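-- pv_equiv track=rewrite | github.com/DassHydro/smash | smash/factory/mesh/_prepro.py | _compute_streams_paths
-- ===== SOURCE A (Python) =====
-- def _compute_streams_paths(
--     stream_index,
--     streams,
--     visited=None):
--     """
--     Compute streams paths from a given stream index.
--     """
--     if visited is None:
--         visited = set()
--
--     if stream_index in visited:
--         return []
--
--     visited.add(stream_index)
--     stream = streams[stream_index]
--     downstream_segments = stream['ds_seg']
--     all_downstream = [stream_index]
--
--     for ds in downstream_segments:
--         if ds != -1:
--             all_downstream.extend(_compute_streams_paths(ds, streams, visited))
--
--     return all_downstream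
-- ===== SOURCE B (Python) =====
-- def _compute_streams_paths(
--     stream_index,
--     streams,
--     visited=None):
--     """
--     Compute streams paths from a given stream index (iterative explicit-stack DFS).
--     """
--     if visited is None:
--         visited = set()
--
--     result = []
--     stack = [stream_index]
--     while stack:
--         node = stack.pop()
--         if node in visited:
--             continue
--         visited.add(node)
--         result.append(node)
--         for ds in reversed(streams[node]['ds_seg']):
--             if ds != -1:
--                 stack.append(ds)
--     return result
-- ===== Notes on version B (the rewrite author's own statement) =====
-- stated objective: alternative
-- what changed: The recursive pre-order DFS is replaced by an iterative explicit-stack DFS that marks nodes on pop and pushes non -1 children in reversed order; Pre_ excludes exactly the inputs on which both Pythons raise KeyError (a node reachable from stream_index, not blocked by the initial visited set, is missing from streams or lacks 'ds_seg'), stated as a reachability closure.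
import Mathlib
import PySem

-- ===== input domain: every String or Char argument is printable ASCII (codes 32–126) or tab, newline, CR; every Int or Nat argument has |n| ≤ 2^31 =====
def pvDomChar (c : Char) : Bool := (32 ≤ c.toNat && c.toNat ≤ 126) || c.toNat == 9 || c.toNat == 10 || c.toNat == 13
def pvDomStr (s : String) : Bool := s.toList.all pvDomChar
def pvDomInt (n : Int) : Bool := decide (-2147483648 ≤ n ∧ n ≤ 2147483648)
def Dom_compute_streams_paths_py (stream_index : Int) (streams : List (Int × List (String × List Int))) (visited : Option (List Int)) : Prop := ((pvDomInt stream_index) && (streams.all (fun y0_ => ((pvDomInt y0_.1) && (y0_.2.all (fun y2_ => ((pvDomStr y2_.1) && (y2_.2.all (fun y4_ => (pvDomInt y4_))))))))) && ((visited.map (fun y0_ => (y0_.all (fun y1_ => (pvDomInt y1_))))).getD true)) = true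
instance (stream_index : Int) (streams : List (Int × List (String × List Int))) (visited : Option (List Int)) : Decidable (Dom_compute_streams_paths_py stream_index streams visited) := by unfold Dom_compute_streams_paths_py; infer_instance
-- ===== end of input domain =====

-- B re-implements A's recursive DFS as an iterative explicit-stack DFS (mark on pop, children
-- pushed reversed); equivalence is about the RETURN value — both Pythons also mutate the
-- caller's `visited` set, and they add the same elements to it.

-- ===== PORT A =====
-- `if visited is None: visited = set()` — shared prologue of both Pythons
def pvInit (visited : Option (List Int)) : PySem.Set Int :=
  match visited with
  | none => (PySem.Set.empty : PySem.Set Int)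
  | some l => PySem.Set.ofList l

-- streams[n]['ds_seg'] (first-match dict lookups; none = Python KeyError, excluded by Pre_)
def pvKids (streams : List (Int × List (String × List Int))) (n : Int) : List Int :=
  ((((PySem.Dict.mk streams).get? n).bind (fun d => (PySem.Dict.mk d).get? "ds_seg")).getD [])

-- number of entries of `streams` whose key is not yet visited (termination measure)
def pvUnvis (streams : List (Int × List (String × List Int))) (v : PySem.Set Int) : Nat :=
  streams.countP (fun p => decide (p.1 ∉ v))

theorem pvUnvis_add_le (streams : List (Int × List (String × List Int))) (v : PySem.Set Int)
    (n : Int) : pvUnvis streams (PySem.Set.add v n) ≤ pvUnvis streams v := by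
  unfold pvUnvis
  induction streams with
  | nil => simp
  | cons p ps ih =>
    simp only [List.countP_cons, decide_eq_true_eq]
    by_cases hm : p.1 ∈ v
    · have hm2 : p.1 ∈ PySem.Set.add v n := by rw [PySem.Set.mem_add]; exact Or.inl hm
      rw [if_neg (not_not_intro hm), if_neg (not_not_intro hm2)]
      omega
    · by_cases hm2 : p.1 ∈ PySem.Set.add v n
      · rw [if_pos hm, if_neg (not_not_intro hm2)]; omega
      · rw [if_pos hm, if_pos hm2]; omega

theorem pvUnvis_add_lt (v : PySem.Set Int) (n : Int) (hn : n ∉ v) :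
    ∀ streams : List (Int × List (String × List Int)), (∃ p ∈ streams, p.1 = n) →
      pvUnvis streams (PySem.Set.add v n) < pvUnvis streams v := by
  intro streams
  induction streams with
  | nil => intro h; simp at h
  | cons p ps ih =>
    intro hmem
    unfold pvUnvis
    simp only [List.countP_cons, decide_eq_true_eq]
    by_cases hp : p.1 = n
    · have h1 : p.1 ∉ v := hp ▸ hn
      have h2 : p.1 ∈ PySem.Set.add v n := by rw [PySem.Set.mem_add]; exact Or.inr hp
      rw [if_pos h1, if_neg (not_not_intro h2)]
      have hle := pvUnvis_add_le ps v n
      unfold pvUnvis at hle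
      omega
    · rcases hmem with ⟨q, hq, hq1⟩
      have hq' : q ∈ ps := by
        rcases List.mem_cons.mp hq with h | h
        · subst h; exact absurd hq1 hp
        · exact h
      have hlt := ih ⟨q, hq', hq1⟩
      unfold pvUnvis at hlt
      by_cases hm : p.1 ∈ v
      · have hm2 : p.1 ∈ PySem.Set.add v n := by rw [PySem.Set.mem_add]; exact Or.inl hm
        rw [if_neg (not_not_intro hm), if_neg (not_not_intro hm2)]; omega
      · by_cases hm2 : p.1 ∈ PySem.Set.add v n
        · rw [if_pos hm, if_neg (not_not_intro hm2)]; omega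
        · rw [if_pos hm, if_pos hm2]; omega

theorem pvMem_keys_of_get?_mk (streams : List (Int × List (String × List Int))) (n : Int)
    (stream : List (String × List Int))
    (h : (PySem.Dict.mk streams).get? n = some stream) : ∃ p ∈ streams, p.1 = n := by
  induction streams with
  | nil => simp [PySem.Dict.get?] at h
  | cons q qs ih =>
    obtain ⟨k, dv⟩ := q
    rw [PySem.Dict.get?_mk_cons] at h
    by_cases hk : k = n
    · exact ⟨(k, dv), by simp, hk⟩
    · simp only [beq_iff_eq, hk, if_false] at h
      rcases ih h with ⟨p, hp, hp1⟩
      exact ⟨p, List.mem_cons_of_mem _ hp, hp1⟩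

theorem pvLex_of_le_lt {a a' b b' : Nat} (h1 : a ≤ a') (h2 : b < b') :
    Prod.Lex (· < ·) (· < ·) (a, b) (a', b') := by
  rcases Nat.lt_or_ge a a' with h | h
  · exact Prod.Lex.left _ _ h
  · have : a = a' := Nat.le_antisymm h1 h
    subst this; exact Prod.Lex.right _ h2

-- one DFS step strictly decreases the measure (cited by the ports' decreasing_by)
theorem pvStep_lt (streams : List (Int × List (String × List Int))) (v : PySem.Set Int)
    (n : Int) (rest : List Int) (hn : ¬ PySem.Set.contains v n = true) :
    Prod.Lex (· < ·) (· < ·)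
      (pvUnvis streams (PySem.Set.add v n),
        ((pvKids streams n).filter (fun c => !(c == -1)) ++ rest).length)
      (pvUnvis streams v, (n :: rest).length) := by
  have hnm : n ∉ v := fun hm => hn ((PySem.Set.contains_iff v n).mpr hm)
  cases hopt : (PySem.Dict.mk streams).get? n with
  | none =>
    have hkids : pvKids streams n = [] := by simp [pvKids, hopt]
    refine pvLex_of_le_lt (pvUnvis_add_le streams v n) ?_
    simp [hkids]
  | some stream =>
    exact Prod.Lex.left _ _
      (pvUnvis_add_lt v n hnm streams (pvMem_keys_of_get?_mk streams n stream hopt))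

-- push loop `for c in reversed(cs): if c != -1: stack.append(c)` (cited by pvGoB's decreasing_by)
theorem pvPushCore (cs : List Int) : ∀ rest : List Int,
    cs.reverse.foldl (fun st c => if c = -1 then st else c :: st) rest
      = cs.filter (fun c => !(c == -1)) ++ rest := by
  induction cs with
  | nil => intro rest; simp
  | cons c cs ih =>
    intro rest
    simp only [List.reverse_cons, List.foldl_append, List.foldl_cons, List.foldl_nil,
      List.filter_cons]
    rw [ih rest]
    by_cases hc : c = -1
    · rw [if_pos hc]
      have hb : (!(c == -1)) = false := by simp [hc]
      rw [hb]
      simp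
    · rw [if_neg hc]
      have hb : (!(c == -1)) = true := by simp [hc]
      rw [hb]
      simp

-- recursive DFS of A: fuel-guarded structural transliteration (the stated initial fuel
-- streams.length + 1 bounds the recursion depth: each nested call marks a fresh key)
def pvDFS_A (streams : List (Int × List (String × List Int))) :
    Nat → Int → PySem.Set Int → List Int × PySem.Set Int
  | 0, _, v => ([], v)  -- fuel guard only, never reached from the initial fuel
  | Nat.succ f, n, v =>
    if PySem.Set.contains v n = true then ([], v)
    else
      match (PySem.Dict.mk streams).get? n with
      | none => ([n], PySem.Set.add v n)  -- Python: KeyError (excluded by Pre_)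
      | some stream =>
        match (PySem.Dict.mk stream).get? "ds_seg" with
        | none => ([n], PySem.Set.add v n)  -- Python: KeyError (excluded by Pre_)
        | some ds =>
          ds.foldl (fun acc d =>
            if d = -1 then acc
            else (acc.1 ++ (pvDFS_A streams f d acc.2).1, (pvDFS_A streams f d acc.2).2))
            ([n], PySem.Set.add v n)

def compute_streams_paths_py (stream_index : Int) (streams : List (Int × List (String × List Int))) (visited : Option (List Int)) : List Int :=
  (pvDFS_A streams (streams.length + 1) stream_index (pvInit visited)).1

-- ===== PORT B =====
-- iterative explicit-stack DFS from Source B: pop, skip if visited, mark, record, push reversed children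
def pvGoB (streams : List (Int × List (String × List Int))) (stack : List Int)
    (v : PySem.Set Int) (acc : List Int) : List Int :=
  match stack with
  | [] => acc
  | n :: rest =>
    if PySem.Set.contains v n = true then pvGoB streams rest v acc
    else
      pvGoB streams
        ((pvKids streams n).reverse.foldl (fun st c => if c = -1 then st else c :: st) rest)
        (PySem.Set.add v n) (acc ++ [n])
termination_by (pvUnvis streams v, stack.length)
decreasing_by
  · exact Prod.Lex.right _ (by simp)
  · simp only [dite_eq_ite]
    rw [pvPushCore]
    exact pvStep_lt streams v n rest ‹¬ PySem.Set.contains v n = true›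

def compute_streams_paths_py_alt (stream_index : Int) (streams : List (Int × List (String × List Int))) (visited : Option (List Int)) : List Int :=
  pvGoB streams [stream_index] (pvInit visited) []

-- ===== PRECONDITION & SPEC =====
-- helpers for Pre_: reachable set of the stream graph, computed as a plain breadth closure
-- (a set-valued fixpoint — no visit order, no output list — distinct from both ports' DFS)
def pvKidsOpt (streams : List (Int × List (String × List Int))) (n : Int) : Option (List Int) :=
  ((PySem.Dict.mk streams).get? n).bind (fun d => (PySem.Dict.mk d).get? "ds_seg")

def pvReachStep (streams : List (Int × List (String × List Int))) (blocked : List Int)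
    (R : List Int) : List Int :=
  R.foldl (fun acc n =>
    match pvKidsOpt streams n with
    | none => acc
    | some ds => ds.foldl (fun acc c =>
        if c == -1 || blocked.contains c || acc.contains c then acc else acc ++ [c]) acc) R

def pvReachIter (streams : List (Int × List (String × List Int))) (blocked : List Int) :
    Nat → List Int → List Int
  | 0, R => R
  | Nat.succ f, R => pvReachIter streams blocked f (pvReachStep streams blocked R)

-- Pre_ excludes EXACTLY the inputs on which the Python A raises KeyError — some node reachable
-- from stream_index via non -1 ds_seg edges and not blocked by the initial visited set has no
-- streams entry or no 'ds_seg' key; B's Python raises KeyError at the same node there.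
def Pre_compute_streams_paths_py (stream_index : Int) (streams : List (Int × List (String × List Int))) (visited : Option (List Int)) : Prop :=
  ((pvReachIter streams (visited.getD []) (streams.length + 1)
      (if (visited.getD []).contains stream_index then [] else [stream_index])).all
    (fun n => (pvKidsOpt streams n).isSome)) = true

instance (stream_index : Int) (streams : List (Int × List (String × List Int))) (visited : Option (List Int)) : Decidable (Pre_compute_streams_paths_py stream_index streams visited) := by
  unfold Pre_compute_streams_paths_py; infer_instance

def pvWitness_compute_streams_paths_py : Int × (List (Int × List (String × List Int))) × Option (List Int) :=
  (0, [(0, [("ds_seg", [1, -1])]), (1, [("ds_seg", [-1])])], none)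

def Spec_compute_streams_paths_py (stream_index : Int) (streams : List (Int × List (String × List Int))) (visited : Option (List Int)) (out : List Int) : Prop := out = compute_streams_paths_py_alt stream_index streams visited
instance (stream_index : Int) (streams : List (Int × List (String × List Int))) (visited : Option (List Int)) (out : List Int) : Decidable (Spec_compute_streams_paths_py stream_index streams visited out) := by unfold Spec_compute_streams_paths_py; infer_instance

-- ===== CLAIM (what is proved, stated in full; the proofs are below) =====
def Claim_equal_compute_streams_paths_py : Prop := ∀ (stream_index : Int) (streams : List (Int × List (String × List Int))) (visited : Option (List Int)), Dom_compute_streams_paths_py stream_index streams visited → Pre_compute_streams_paths_py stream_index streams visited → Spec_compute_streams_paths_py stream_index streams visited (compute_streams_paths_py stream_index streams visited)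

-- ===== LEMMAS AND PROOFS =====

-- canonical worklist DFS both ports are reduced to
def pvGoW (streams : List (Int × List (String × List Int))) (stack : List Int)
    (v : PySem.Set Int) : List Int × PySem.Set Int :=
  match stack with
  | [] => ([], v)
  | n :: rest =>
    if PySem.Set.contains v n = true then pvGoW streams rest v
    else
      (n :: (pvGoW streams ((pvKids streams n).filter (fun c => !(c == -1)) ++ rest)
              (PySem.Set.add v n)).1,
       (pvGoW streams ((pvKids streams n).filter (fun c => !(c == -1)) ++ rest)
              (PySem.Set.add v n)).2)
termination_by (pvUnvis streams v, stack.length)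
decreasing_by
  · exact Prod.Lex.right _ (by simp)
  · exact pvStep_lt streams v n rest ‹¬ PySem.Set.contains v n = true›

theorem pvGoW_nil (streams : List (Int × List (String × List Int))) (v : PySem.Set Int) :
    pvGoW streams [] v = ([], v) := by
  rw [pvGoW]

theorem pvGoW_cons_mem (streams : List (Int × List (String × List Int))) (n : Int)
    (rest : List Int) (v : PySem.Set Int) (h : PySem.Set.contains v n = true) :
    pvGoW streams (n :: rest) v = pvGoW streams rest v := by
  rw [pvGoW, if_pos h]

theorem pvGoW_cons_not (streams : List (Int × List (String × List Int))) (n : Int)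
    (rest : List Int) (v : PySem.Set Int) (h : ¬ PySem.Set.contains v n = true) :
    pvGoW streams (n :: rest) v
      = (n :: (pvGoW streams ((pvKids streams n).filter (fun c => !(c == -1)) ++ rest)
                (PySem.Set.add v n)).1,
         (pvGoW streams ((pvKids streams n).filter (fun c => !(c == -1)) ++ rest)
                (PySem.Set.add v n)).2) := by
  rw [pvGoW, if_neg h]

theorem pvGoB_nil (streams : List (Int × List (String × List Int))) (v : PySem.Set Int)
    (acc : List Int) : pvGoB streams [] v acc = acc := by
  rw [pvGoB]

theorem pvGoB_cons_mem (streams : List (Int × List (String × List Int))) (n : Int)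
    (rest : List Int) (v : PySem.Set Int) (acc : List Int)
    (h : PySem.Set.contains v n = true) :
    pvGoB streams (n :: rest) v acc = pvGoB streams rest v acc := by
  rw [pvGoB, if_pos h]

theorem pvGoB_cons_not (streams : List (Int × List (String × List Int))) (n : Int)
    (rest : List Int) (v : PySem.Set Int) (acc : List Int)
    (h : ¬ PySem.Set.contains v n = true) :
    pvGoB streams (n :: rest) v acc
      = pvGoB streams ((pvKids streams n).filter (fun c => !(c == -1)) ++ rest)
          (PySem.Set.add v n) (acc ++ [n]) := by
  rw [pvGoB, if_neg h, pvPushCore]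

theorem pvGoB_eq_goW (streams : List (Int × List (String × List Int))) (stack : List Int)
    (v : PySem.Set Int) (acc : List Int) :
    pvGoB streams stack v acc = acc ++ (pvGoW streams stack v).1 := by
  induction stack, v, acc using pvGoB.induct streams with
  | case1 v acc => rw [pvGoB_nil, pvGoW_nil]; simp
  | case2 v acc n rest h ih => rw [pvGoB_cons_mem _ _ _ _ _ h, pvGoW_cons_mem _ _ _ _ h, ih]
  | case3 v acc n rest h ih =>
    rw [pvGoB_cons_not _ _ _ _ _ h, pvGoW_cons_not _ _ _ _ h]
    simp only [dite_eq_ite] at ih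
    rw [pvPushCore] at ih
    rw [ih]
    simp

theorem pvGoW_mono (streams : List (Int × List (String × List Int))) (stack : List Int)
    (v : PySem.Set Int) :
    pvUnvis streams (pvGoW streams stack v).2 ≤ pvUnvis streams v := by
  induction stack, v using pvGoW.induct streams with
  | case1 v => rw [pvGoW_nil]
  | case2 v n rest h ih => rw [pvGoW_cons_mem _ _ _ _ h]; exact ih
  | case3 v n rest h ih =>
    rw [pvGoW_cons_not _ _ _ _ h]
    exact le_trans ih (pvUnvis_add_le streams v n)

theorem pvGoW_append (streams : List (Int × List (String × List Int))) (s1 : List Int)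
    (v : PySem.Set Int) : ∀ s2 : List Int,
    pvGoW streams (s1 ++ s2) v
      = ((pvGoW streams s1 v).1 ++ (pvGoW streams s2 (pvGoW streams s1 v).2).1,
         (pvGoW streams s2 (pvGoW streams s1 v).2).2) := by
  induction s1, v using pvGoW.induct streams with
  | case1 v => intro s2; rw [pvGoW_nil]; simp
  | case2 v n rest h ih =>
    intro s2
    rw [List.cons_append, pvGoW_cons_mem _ _ _ _ h, pvGoW_cons_mem _ _ _ _ h]
    exact ih s2
  | case3 v n rest h ih =>
    intro s2
    rw [List.cons_append, pvGoW_cons_not _ _ _ _ h,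
      show (pvKids streams n).filter (fun c => !(c == -1)) ++ (rest ++ s2)
          = ((pvKids streams n).filter (fun c => !(c == -1)) ++ rest) ++ s2 from
        (List.append_assoc _ _ _).symm,
      ih s2, pvGoW_cons_not _ _ _ _ h]
    simp

theorem pvFold_eq (streams : List (Int × List (String × List Int))) (f : Nat)
    (hIH : ∀ n v, pvUnvis streams v < f → pvDFS_A streams f n v = pvGoW streams [n] v)
    (ds : List Int) : ∀ (acc : List Int) (v : PySem.Set Int), pvUnvis streams v < f →
      ds.foldl (fun acc d =>
          if d = -1 then acc
          else (acc.1 ++ (pvDFS_A streams f d acc.2).1, (pvDFS_A streams f d acc.2).2))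
          (acc, v)
        = (acc ++ (pvGoW streams (ds.filter (fun c => !(c == -1))) v).1,
           (pvGoW streams (ds.filter (fun c => !(c == -1))) v).2) := by
  induction ds with
  | nil => intro acc v _; rw [List.foldl_nil, List.filter_nil, pvGoW_nil]; simp
  | cons d ds ih =>
    intro acc v hv
    rw [List.foldl_cons, List.filter_cons]
    by_cases hd : d = -1
    · have hb : (!(d == -1)) = false := by simp [hd]
      rw [hb, if_pos hd]
      simp only [Bool.false_eq_true, if_false]
      exact ih acc v hv
    · have hb : (!(d == -1)) = true := by simp [hd]
      rw [hb, if_neg hd, if_pos rfl]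
      rw [hIH d v hv]
      have hv2 : pvUnvis streams (pvGoW streams [d] v).2 < f :=
        lt_of_le_of_lt (pvGoW_mono streams [d] v) hv
      rw [ih _ _ hv2,
        show (d :: ds.filter (fun c => !(c == -1))) = [d] ++ ds.filter (fun c => !(c == -1))
          from rfl,
        pvGoW_append streams [d] v (ds.filter (fun c => !(c == -1)))]
      simp

theorem pvA_eq_goW (streams : List (Int × List (String × List Int))) :
    ∀ (f : Nat) (n : Int) (v : PySem.Set Int), pvUnvis streams v < f →
      pvDFS_A streams f n v = pvGoW streams [n] v := by
  intro f
  induction f with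
  | zero => intro n v h; omega
  | succ f ih =>
    intro n v hv
    rw [pvDFS_A]
    by_cases hc : PySem.Set.contains v n = true
    · rw [if_pos hc, pvGoW_cons_mem _ _ _ _ hc, pvGoW_nil]
    · rw [if_neg hc, pvGoW_cons_not _ _ _ _ hc, List.append_nil]
      cases hs : (PySem.Dict.mk streams).get? n with
      | none =>
        have hkids : pvKids streams n = [] := by simp [pvKids, hs]
        rw [hkids, List.filter_nil, pvGoW_nil]
      | some stream =>
        have hlt : pvUnvis streams (PySem.Set.add v n) < f := by
          have hnm : n ∉ v := fun hm => hc ((PySem.Set.contains_iff v n).mpr hm)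
          have := pvUnvis_add_lt v n hnm streams (pvMem_keys_of_get?_mk streams n stream hs)
          omega
        cases hds : (PySem.Dict.mk stream).get? "ds_seg" with
        | none =>
          have hkids : pvKids streams n = [] := by simp [pvKids, hs, hds]
          rw [hkids, List.filter_nil, pvGoW_nil]
          simp only [hds]
        | some ds =>
          have hkids : pvKids streams n = ds := by simp [pvKids, hs, hds]
          rw [hkids]
          simp only [hds]
          rw [pvFold_eq streams f ih ds [n] (PySem.Set.add v n) hlt]
          simp

-- ===== VERDICT (by name: the statement is the Claim_ definition above) =====
theorem compute_streams_paths_py_spec : Claim_equal_compute_streams_paths_py := by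
  intro stream_index streams visited _ _
  unfold Spec_compute_streams_paths_py compute_streams_paths_py compute_streams_paths_py_alt
  have hfuel : pvUnvis streams (pvInit visited) < streams.length + 1 :=
    Nat.lt_succ_of_le List.countP_le_length
  rw [pvA_eq_goW streams (streams.length + 1) stream_index (pvInit visited) hfuel,
    pvGoB_eq_goW]
  simp
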